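-- pv_equiv track=rewrite | github.com/chaudbak/iherb-scraper-searcher | iherb_scraper.py | has_overlapping_chars
-- ===== SOURCE A (Python) =====
-- def has_overlapping_chars(text1, text2, min_overlap=3):
--   text1 = text1.lower()
--   text2 = text2.lower()
--   if text1 == text2:
--     return True
--
--   count = index = 0
--   for ch in text1:
--     index = text2.find(ch, index)
--     if index == -1:
--       count = index = 0
--     else:
--       count += 1
--     if count >= min_overlap:
--       return True
--
--   return False
-- ===== SOURCE B (Python) =====
-- def _lower_bound(a, x):
--     # first position k with a[k] >= x (binary search; a is sorted ascending)
--     lo, hi = 0, len(a)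
--     while lo < hi:
--         mid = (lo + hi) // 2
--         if a[mid] < x:
--             lo = mid + 1
--         else:
--             hi = mid
--     return lo
--
--
-- def has_overlapping_chars(text1, text2, min_overlap=3):
--     text1 = text1.lower()
--     text2 = text2.lower()
--     if text1 == text2:
--         return True
--
--     positions = {}
--     for j, c in enumerate(text2):
--         positions.setdefault(c, []).append(j)
--
--     count = index = 0
--     for ch in text1:
--         lst = positions.get(ch, [])
--         k = _lower_bound(lst, index)
--         if k == len(lst):
--             count = index = 0
--         else:
--             index = lst[k]
--             count += 1
--         if count >= min_overlap:
--             return True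
--
--     return False
-- ===== Notes on version B (the rewrite author's own statement) =====
-- stated objective: alternative
-- what changed: B replaces A's repeated text2.find(ch, index) scans by a dict of per-char sorted position lists of text2 built once, answering each character query with a hand-written binary search (lower bound); it trades A's C-level find scans for an index with logarithmic queries, which is not measurably faster in wall time.
import Mathlib
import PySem

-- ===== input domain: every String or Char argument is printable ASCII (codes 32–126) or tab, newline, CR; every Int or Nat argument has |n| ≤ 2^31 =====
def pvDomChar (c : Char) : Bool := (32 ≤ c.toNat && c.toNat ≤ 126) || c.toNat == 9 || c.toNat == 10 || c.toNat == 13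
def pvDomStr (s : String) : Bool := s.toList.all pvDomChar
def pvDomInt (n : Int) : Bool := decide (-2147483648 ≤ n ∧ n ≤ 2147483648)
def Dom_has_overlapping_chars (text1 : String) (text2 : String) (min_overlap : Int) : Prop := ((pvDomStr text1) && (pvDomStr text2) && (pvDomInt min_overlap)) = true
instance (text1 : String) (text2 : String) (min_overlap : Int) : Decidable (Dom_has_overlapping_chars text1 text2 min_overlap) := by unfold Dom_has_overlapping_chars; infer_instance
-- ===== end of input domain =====

-- B replaces A's repeated str.find scans by a per-char sorted position index of text2 queried
-- with binary search; equivalence of the return value is proved below (neither program mutates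
-- its arguments).

-- ===== PORT A =====
-- the for-loop of A: state (count, index), early return True
def hocLoopA (t2 : List Char) (mo : Int) : List Char → Int → Int → Bool
  | [], _, _ => false
  | ch :: rest, count, index =>
    let i := PySem.Chars.findFrom t2 [ch] index none   -- text2.find(ch, index)
    if i = -1 then
      if (0 : Int) ≥ mo then true else hocLoopA t2 mo rest 0 0
    else
      if count + 1 ≥ mo then true else hocLoopA t2 mo rest (count + 1) i

def has_overlapping_chars (text1 : String) (text2 : String) (min_overlap : Int) : Bool :=
  let t1 := PySem.Str.lower text1
  let t2 := PySem.Str.lower text2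
  if t1 = t2 then true
  else hocLoopA t2.toList min_overlap t1.toList 0 0

-- ===== PORT B =====
-- _lower_bound(a, x): binary search, first k with a[k] >= x
def hocLowerBound (a : List Int) (x : Int) (lo hi : Int) : Int :=
  if h : lo < hi then
    if PySem.List.pyGetD a (PySem.Int.floordiv (lo + hi) 2) 0 < x then
      hocLowerBound a x (PySem.Int.floordiv (lo + hi) 2 + 1) hi
    else
      hocLowerBound a x lo (PySem.Int.floordiv (lo + hi) 2)
  else lo
termination_by (hi - lo).toNat
decreasing_by
  · have h1 := (PySem.Int.floordiv_two_mid_bounds (le_of_lt h)).1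
    omega
  · have h1 := (PySem.Int.floordiv_two_mid_bounds (le_of_lt h)).1
    have h2 : PySem.Int.floordiv (lo + hi) 2 < hi :=
      (PySem.Int.floordiv_lt_iff_lt_mul (by norm_num)).2 (by omega)
    omega

-- the dict built by: for j, c in enumerate(text2): positions.setdefault(c, []).append(j)
def hocPositions (t2 : List Char) : PySem.Dict Char (List Int) :=
  (PySem.List.enumerate t2 0).foldl (fun d p => d.modify p.2 [] (· ++ [p.1])) PySem.Dict.empty

-- the for-loop of B: state (count, index), early return True
def hocLoopB (P : PySem.Dict Char (List Int)) (mo : Int) : List Char → Int → Int → Bool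
  | [], _, _ => false
  | ch :: rest, count, index =>
    let lst := P.getD ch []
    let k := hocLowerBound lst index 0 (lst.length : Int)
    if k = (lst.length : Int) then
      if (0 : Int) ≥ mo then true else hocLoopB P mo rest 0 0
    else
      if count + 1 ≥ mo then true else hocLoopB P mo rest (count + 1) (PySem.List.pyGetD lst k 0)

def has_overlapping_chars_alt (text1 : String) (text2 : String) (min_overlap : Int) : Bool :=
  let t1 := PySem.Str.lower text1
  let t2 := PySem.Str.lower text2
  if t1 = t2 then true
  else hocLoopB (hocPositions t2.toList) min_overlap t1.toList 0 0

-- ===== PRECONDITION & SPEC =====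
def Spec_has_overlapping_chars (text1 : String) (text2 : String) (min_overlap : Int) (out : Bool) : Prop := out = has_overlapping_chars_alt text1 text2 min_overlap
instance (text1 : String) (text2 : String) (min_overlap : Int) (out : Bool) : Decidable (Spec_has_overlapping_chars text1 text2 min_overlap out) := by unfold Spec_has_overlapping_chars; infer_instance

-- ===== CLAIM (what is proved, stated in full; the proofs are below) =====
def Claim_equal_has_overlapping_chars : Prop := ∀ (text1 : String) (text2 : String) (min_overlap : Int), Dom_has_overlapping_chars text1 text2 min_overlap → Spec_has_overlapping_chars text1 text2 min_overlap (has_overlapping_chars text1 text2 min_overlap)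

-- ===== LEMMAS AND PROOFS =====

-- the sorted list of positions of ch in t2 (what positions[ch] holds)
def hocPosList (t2 : List Char) (ch : Char) : List Int :=
  ((PySem.List.enumerate t2 0).filter (fun p => p.2 == ch)).map (·.1)

lemma hocPositions_getD (t2 : List Char) (ch : Char) :
    (hocPositions t2).getD ch [] = hocPosList t2 ch := by
  unfold hocPositions hocPosList
  have h : (PySem.List.enumerate t2 0).foldl (fun d p => d.modify p.2 [] (· ++ [p.1])) PySem.Dict.empty
      = ((PySem.List.enumerate t2 0).map Prod.swap).foldl (fun d p => d.modify p.1 [] (· ++ [p.2])) PySem.Dict.empty := by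
    rw [List.foldl_map]
    rfl
  rw [h, PySem.Dict.getD_foldl_modify_append]
  simp [List.filter_map, List.map_map, Function.comp_def, Prod.swap]

lemma hocPosList_sorted (t2 : List Char) (ch : Char) :
    (hocPosList t2 ch).Pairwise (· < ·) := by
  unfold hocPosList
  rw [List.pairwise_map]
  exact (PySem.List.pairwise_lt_enumerate t2 0).filter _

lemma mem_hocPosList (t2 : List Char) (ch : Char) (y : Int) :
    y ∈ hocPosList t2 ch ↔ ∃ (k : Nat) (_ : k < t2.length), y = (k : Int) ∧ t2[k] = ch := by
  unfold hocPosList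
  simp only [List.mem_map, List.mem_filter, PySem.List.mem_enumerate_iff]
  constructor
  · rintro ⟨p, ⟨⟨k, hk, rfl⟩, hch⟩, rfl⟩
    exact ⟨k, hk, by simp, by simpa using hch⟩
  · rintro ⟨k, hk, rfl, hch⟩
    exact ⟨((k : Int), t2[k]), ⟨⟨k, hk, by simp⟩, by simpa using hch⟩, rfl⟩

lemma hocLowerBound_spec (a : List Int) (x : Int) (hs : a.Pairwise (· ≤ ·)) :
    ∀ lo hi : Int, 0 ≤ lo → lo ≤ hi → hi ≤ (a.length : Int) →
      lo ≤ hocLowerBound a x lo hi ∧ hocLowerBound a x lo hi ≤ hi ∧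
      (∀ j : Int, lo ≤ j → j < hocLowerBound a x lo hi → PySem.List.pyGetD a j 0 < x) ∧
      (hocLowerBound a x lo hi < hi → x ≤ PySem.List.pyGetD a (hocLowerBound a x lo hi) 0) := by
  have mono : ∀ i j : Int, 0 ≤ i → i ≤ j → j < (a.length : Int) →
      PySem.List.pyGetD a i 0 ≤ PySem.List.pyGetD a j 0 := by
    intro i j hi0 hij hjl
    rw [PySem.List.pyGetD_eq_getElem a 0 hi0 (by omega),
        PySem.List.pyGetD_eq_getElem a 0 (by omega) hjl]
    rcases eq_or_lt_of_le hij with h | h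
    · subst h; exact le_refl _
    · exact List.pairwise_iff_getElem.mp hs i.toNat j.toNat (by omega) (by omega) (by omega)
  intro lo hi
  induction lo, hi using hocLowerBound.induct a x with
  | case1 lo hi h hlt ih =>
    intro h0 hle hhi
    have hb := PySem.Int.floordiv_two_mid_bounds (le_of_lt h)
    have hmlt : PySem.Int.floordiv (lo + hi) 2 < hi :=
      (PySem.Int.floordiv_lt_iff_lt_mul (by norm_num)).2 (by omega)
    rw [hocLowerBound, dif_pos h, if_pos hlt]
    obtain ⟨i1, i2, i3, i4⟩ := ih (by omega) (by omega) hhi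
    refine ⟨by omega, i2, ?_, i4⟩
    intro j hj1 hj2
    by_cases hc : PySem.Int.floordiv (lo + hi) 2 + 1 ≤ j
    · exact i3 j hc hj2
    · calc PySem.List.pyGetD a j 0
          ≤ PySem.List.pyGetD a (PySem.Int.floordiv (lo + hi) 2) 0 :=
            mono j _ (by omega) (by omega) (by omega)
        _ < x := hlt
  | case2 lo hi h hge ih =>
    intro h0 hle hhi
    have hb := PySem.Int.floordiv_two_mid_bounds (le_of_lt h)
    have hmlt : PySem.Int.floordiv (lo + hi) 2 < hi :=
      (PySem.Int.floordiv_lt_iff_lt_mul (by norm_num)).2 (by omega)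
    rw [hocLowerBound, dif_pos h, if_neg hge]
    obtain ⟨i1, i2, i3, i4⟩ := ih h0 (by omega) (by omega)
    refine ⟨i1, by omega, i3, ?_⟩
    intro _
    rcases eq_or_lt_of_le i2 with he | hl
    · rw [he]; exact not_lt.mp hge
    · exact i4 hl
  | case3 lo hi h =>
    intro h0 hle hhi
    rw [hocLowerBound, dif_neg h]
    exact ⟨le_refl _, hle, fun j h1 h2 => absurd (lt_of_le_of_lt h1 h2) (lt_irrefl _),
      fun h' => absurd h' (by omega)⟩

lemma singleton_prefix_iff {α : Type} (a : α) (l : List α) :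
    [a] <+: l ↔ ∃ t, l = a :: t := by
  cases l with
  | nil => simp
  | cons b t => simp [List.cons_prefix_cons, eq_comm]

lemma singleton_prefix_drop {s : List Char} {ch : Char} {n : Nat} :
    [ch] <+: s.drop n ↔ ∃ _ : n < s.length, s[n] = ch := by
  rw [singleton_prefix_iff]
  constructor
  · rintro ⟨t, ht⟩
    have h1 : (s.drop n).length = s.length - n := List.length_drop ..
    have hn : n < s.length := by
      by_contra hc
      rw [List.drop_eq_nil_of_le (by omega)] at ht; simp at ht
    refine ⟨hn, ?_⟩
    have h0 : 0 < (s.drop n).length := by rw [ht]; simp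
    have h2 := (List.getElem_drop (xs := s) (i := n) (j := 0) (h := h0)).symm
    simp only [Nat.add_zero] at h2
    rw [h2]
    simp [ht]
  · rintro ⟨hn, hch⟩
    refine ⟨s.drop (n+1), ?_⟩
    rw [← hch]
    exact (List.drop_eq_getElem_cons (by omega)).trans (by simp)

lemma singleton_infix_iff {α : Type} (a : α) (l : List α) :
    [a] <:+: l ↔ a ∈ l := by
  constructor
  · intro h; exact h.sublist.mem (by simp)
  · intro h
    obtain ⟨s, t, rfl⟩ := List.mem_iff_append.mp h
    exact ⟨s, t, by simp⟩

lemma hocFind_single (s : List Char) (ch : Char) :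
    PySem.Chars.find s [ch] =
      (match PySem.List.index? s ch with | none => -1 | some k => (k : Int)) := by
  cases hidx : PySem.List.index? s ch with
  | none =>
    have hmem : ch ∉ s := (PySem.List.index?_eq_none_iff s ch).mp hidx
    exact (PySem.Chars.find_eq_neg_one_iff s [ch]).mpr (fun hin => hmem ((singleton_infix_iff ch s).mp hin))
  | some k =>
    obtain ⟨hk, hkch, hmin⟩ := PySem.List.getElem_of_index?_eq_some hidx
    have hmem : ch ∈ s := by rw [← hkch]; exact List.getElem_mem hk
    have hnn : 0 ≤ PySem.Chars.find s [ch] :=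
      (PySem.Chars.find_nonneg_iff s [ch]).mpr ((singleton_infix_iff ch s).mpr hmem)
    obtain ⟨hpre, hminf⟩ := PySem.Chars.find_spec hnn
    obtain ⟨hlt, hgetf⟩ := singleton_prefix_drop.mp hpre
    -- find.toNat = k by minimality both ways
    have h1 : ¬ k < (PySem.Chars.find s [ch]).toNat := by
      intro hc
      exact hminf k hc (singleton_prefix_drop.mpr ⟨hk, hkch⟩)
    have h2 : ¬ (PySem.Chars.find s [ch]).toNat < k := by
      intro hc
      exact hmin _ hc hgetf
    have : (PySem.Chars.find s [ch]).toNat = k := by omega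
    simp only []
    omega

lemma hocDropGet {t2 : List Char} {n m : Nat} (hnm : n ≤ m) (hm : m < t2.length) :
    (t2.drop n)[m - n]? = some t2[m] := by
  rw [List.getElem?_drop, show n + (m - n) = m from by omega]
  exact List.getElem?_eq_getElem hm

lemma hocStep_eq (t2 : List Char) (ch : Char) (i : Int) (h0 : 0 ≤ i) (hle : i ≤ (t2.length : Int)) :
    PySem.Chars.findFrom t2 [ch] i none =
      (if hocLowerBound (hocPosList t2 ch) i 0 ((hocPosList t2 ch).length : Int)
            = ((hocPosList t2 ch).length : Int)
       then -1
       else PySem.List.pyGetD (hocPosList t2 ch)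
              (hocLowerBound (hocPosList t2 ch) i 0 ((hocPosList t2 ch).length : Int)) 0) := by
  obtain ⟨n, rfl⟩ : ∃ n : Nat, i = (n : Int) := ⟨i.toNat, by omega⟩
  have hn : n ≤ t2.length := by exact_mod_cast hle
  set lst := hocPosList t2 ch with hlst
  set k := hocLowerBound lst (n : Int) 0 (lst.length : Int) with hk
  have hsle : lst.Pairwise (· ≤ ·) := (hocPosList_sorted t2 ch).imp le_of_lt
  obtain ⟨s1, s2, s3, s4⟩ :=
    hocLowerBound_spec lst (n : Int) hsle 0 (lst.length : Int) le_rfl (by positivity) le_rfl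
  rw [← hk] at s1 s2 s3 s4
  rw [PySem.Chars.findFrom_natCast t2 [ch] n hn, hocFind_single]
  cases hidx : PySem.List.index? (t2.drop n) ch with
  | none =>
    have hmem : ch ∉ t2.drop n := (PySem.List.index?_eq_none_iff _ ch).mp hidx
    have hkeq : k = (lst.length : Int) := by
      by_contra hne
      have hklt : k < (lst.length : Int) := by omega
      have hge := s4 hklt
      have hkg : PySem.List.pyGetD lst k 0 = lst[k.toNat]'(by omega) :=
        PySem.List.pyGetD_eq_getElem lst 0 s1 hklt
      have hmemk : PySem.List.pyGetD lst k 0 ∈ lst := by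
        rw [hkg]; exact List.getElem_mem _
      obtain ⟨m, hm, hmeq, hmch⟩ := (mem_hocPosList t2 ch _).mp hmemk
      have hnm : n ≤ m := by omega
      exact hmem (hmch ▸ List.mem_of_getElem? (hocDropGet hnm hm))
    simp [hkeq]
  | some m =>
    obtain ⟨hmlt, hmch, hmmin⟩ := PySem.List.getElem_of_index?_eq_some hidx
    rw [List.length_drop] at hmlt
    have hj0lt : n + m < t2.length := by omega
    have h1 : (t2.drop n)[m]? = some t2[n + m] := by
      have h2 := hocDropGet (show n ≤ n + m by omega) hj0lt
      rwa [show n + m - n = m from by omega] at h2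
    have hj0ch : t2[n + m] = ch := by
      rw [List.getElem?_eq_getElem (show m < (t2.drop n).length by rw [List.length_drop]; omega)] at h1
      injection h1 with h1'
      rw [← h1']; exact hmch
    have hj0mem : ((n + m : Nat) : Int) ∈ lst :=
      (mem_hocPosList t2 ch _).mpr ⟨n + m, hj0lt, rfl, hj0ch⟩
    obtain ⟨p, hp, hpeq⟩ := List.mem_iff_getElem.mp hj0mem
    have hpk : ¬ (p : Int) < k := by
      intro hc
      have h3 := s3 (p : Int) (by positivity) hc
      rw [PySem.List.pyGetD_eq_getElem lst 0 (by positivity) (by exact_mod_cast hp)] at h3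
      simp only [Int.toNat_natCast] at h3
      rw [hpeq] at h3
      push_cast at h3
      omega
    have hklt : k < (lst.length : Int) := by
      rcases lt_or_eq_of_le s2 with h | h
      · exact h
      · exact absurd (show (p : Int) < k by rw [h]; exact_mod_cast hp) hpk
    have hred : (match some m with | none => -1 | some j => (j : Int)) = (m : Int) := rfl
    rw [hred, if_neg (show ¬ (m : Int) = -1 by omega),
       if_neg (show ¬ k = (lst.length : Int) by omega)]
    have hkg : PySem.List.pyGetD lst k 0 = lst[k.toNat]'(by omega) :=
      PySem.List.pyGetD_eq_getElem lst 0 s1 hklt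
    have hmemk : PySem.List.pyGetD lst k 0 ∈ lst := by rw [hkg]; exact List.getElem_mem _
    obtain ⟨m', hm', hmeq', hmch'⟩ := (mem_hocPosList t2 ch _).mp hmemk
    have hge := s4 hklt
    have hnm' : n ≤ m' := by omega
    have hlow : ¬ m' < n + m := by
      intro hc
      have hdl : m' - n < (t2.drop n).length := by rw [List.length_drop]; omega
      have h2 := hocDropGet hnm' hm'
      rw [List.getElem?_eq_getElem hdl] at h2
      injection h2 with h2'
      exact hmmin (m' - n) (by omega) (by rw [h2']; exact hmch')
    have hkp : k.toNat ≤ p := by omega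
    have hle2 : lst[k.toNat]'(by omega) ≤ lst[p] := by
      rcases eq_or_lt_of_le hkp with h | h
      · exact le_of_eq (by simp [h])
      · exact List.pairwise_iff_getElem.mp hsle k.toNat p (by omega) hp h
    have heq : lst[k.toNat]'(by omega) = ((n + m : Nat) : Int) := by
      rw [hpeq] at hle2
      have hup : PySem.List.pyGetD lst k 0 ≤ ((n + m : Nat) : Int) := by rw [hkg]; exact hle2
      have hlo : ((n + m : Nat) : Int) ≤ PySem.List.pyGetD lst k 0 := by rw [hmeq']; push_cast; omega
      rw [hkg] at hup hlo
      omega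
    rw [hkg, heq]
    push_cast
    ring

lemma hocLoop_eq (t2 : List Char) (mo : Int) :
    ∀ (l : List Char) (count i : Int), 0 ≤ i → i ≤ (t2.length : Int) →
      hocLoopA t2 mo l count i = hocLoopB (hocPositions t2) mo l count i := by
  intro l
  induction l with
  | nil => intro count i _ _; rfl
  | cons ch rest ih =>
    intro count i h0 hle
    rw [hocLoopA, hocLoopB]
    simp only [hocPositions_getD]
    rw [hocStep_eq t2 ch i h0 hle]
    set lst := hocPosList t2 ch with hlst
    set k := hocLowerBound lst i 0 (lst.length : Int) with hk
    have hsle : lst.Pairwise (· ≤ ·) := (hocPosList_sorted t2 ch).imp le_of_lt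
    obtain ⟨s1, s2, _, _⟩ :=
      hocLowerBound_spec lst i hsle 0 (lst.length : Int) le_rfl (by positivity) le_rfl
    rw [← hk] at s1 s2
    by_cases hkc : k = (lst.length : Int)
    · rw [if_pos hkc, if_pos hkc, if_pos rfl]
      by_cases hmo : (0 : Int) ≥ mo
      · rw [if_pos hmo, if_pos hmo]
      · rw [if_neg hmo, if_neg hmo]
        exact ih 0 0 le_rfl (by positivity)
    · have hklt : k < (lst.length : Int) := by omega
      have hkg : PySem.List.pyGetD lst k 0 = lst[k.toNat]'(by omega) :=
        PySem.List.pyGetD_eq_getElem lst 0 s1 hklt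
      have hmemk : PySem.List.pyGetD lst k 0 ∈ lst := by rw [hkg]; exact List.getElem_mem _
      obtain ⟨m, hm, hmeq, _⟩ := (mem_hocPosList t2 ch _).mp hmemk
      have hb0 : 0 ≤ PySem.List.pyGetD lst k 0 := by rw [hmeq]; positivity
      have hb1 : PySem.List.pyGetD lst k 0 ≤ (t2.length : Int) := by rw [hmeq]; exact_mod_cast le_of_lt hm
      rw [if_neg hkc, if_neg hkc, if_neg (show ¬ PySem.List.pyGetD lst k 0 = -1 by omega)]
      by_cases hmo : count + 1 ≥ mo
      · rw [if_pos hmo, if_pos hmo]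
      · rw [if_neg hmo, if_neg hmo]
        exact ih (count + 1) _ hb0 hb1

-- ===== VERDICT (by name: the statement is the Claim_ definition above) =====
theorem has_overlapping_chars_spec : Claim_equal_has_overlapping_chars := by
  intro text1 text2 mo _
  unfold Spec_has_overlapping_chars has_overlapping_chars has_overlapping_chars_alt
  by_cases h : PySem.Str.lower text1 = PySem.Str.lower text2
  · simp [h]
  · simp only [h, if_false]
    exact hocLoop_eq _ mo _ 0 0 le_rfl (by positivity)
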